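-- pv_equiv track=rewrite | github.com/seanschneidewent/maestro-openclaw-agent-teams | maestro/tools.py | _page_evidence_flags
-- ===== SOURCE A (Python) =====
-- def _page_evidence_flags(reasons: list[str]) -> dict[str, bool]:
--     items = {str(reason) for reason in reasons or []}
--     return {
--         "material": any(reason.startswith("material:") for reason in items),
--         "keyword": any(reason.startswith("keyword:") for reason in items),
--         "reflection": "sheet_reflection" in items,
--         "pointer": any(reason.startswith("pointer:") for reason in items),
--         "page_name": "page_name" in items,
--     }
-- ===== SOURCE B (Python) =====
-- def _page_evidence_flags(reasons: list[str]) -> dict[str, bool]: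
--     flags = {"material": False, "keyword": False, "reflection": False,
--              "pointer": False, "page_name": False}
--     for r in (reasons or []):
--         s = str(r)
--         if s.startswith("material:"):
--             flags["material"] = True
--         if s.startswith("keyword:"):
--             flags["keyword"] = True
--         if s == "sheet_reflection":
--             flags["reflection"] = True
--         if s.startswith("pointer:"):
--             flags["pointer"] = True
--         if s == "page_name":
--             flags["page_name"] = True
--     return flags
-- ===== Notes on version B (the rewrite author's own statement) =====
-- stated objective: simpler
-- what changed: Replaces A's set construction followed by five separate any()/membership scans with a single pass over the list that accumulates all five flags at once.
import Mathlib
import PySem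

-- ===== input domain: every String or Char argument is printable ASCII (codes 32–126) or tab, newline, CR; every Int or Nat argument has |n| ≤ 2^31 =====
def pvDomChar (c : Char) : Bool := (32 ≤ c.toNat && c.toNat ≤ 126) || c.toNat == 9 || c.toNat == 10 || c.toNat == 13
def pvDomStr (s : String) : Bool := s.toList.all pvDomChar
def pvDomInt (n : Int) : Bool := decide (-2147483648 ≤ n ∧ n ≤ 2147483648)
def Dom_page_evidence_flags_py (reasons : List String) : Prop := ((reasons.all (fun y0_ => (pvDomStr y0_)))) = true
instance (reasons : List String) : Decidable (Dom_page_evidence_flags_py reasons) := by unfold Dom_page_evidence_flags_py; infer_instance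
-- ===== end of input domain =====

-- B replaces A's set construction plus five separate scans with one accumulating pass; objective: simpler.

-- ===== PORT A =====
-- 'reasons or []' on a list yields the same elements; str(reason) is the identity on str.
def page_evidence_flags_py (reasons : List String) : List (String × Bool) :=
  let items : PySem.Set String := PySem.Set.ofList (reasons.map (fun reason => reason))
  [("material", items.any (fun reason => PySem.Str.startswith reason "material:")),
   ("keyword", items.any (fun reason => PySem.Str.startswith reason "keyword:")),
   ("reflection", PySem.Set.contains items "sheet_reflection"),
   ("pointer", items.any (fun reason => PySem.Str.startswith reason "pointer:")),
   ("page_name", PySem.Set.contains items "page_name")]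

-- ===== PORT B =====
-- single pass: state = (material, keyword, reflection, pointer, page_name)
def pageFlagsStep (st : Bool × Bool × Bool × Bool × Bool) (s : String) :
    Bool × Bool × Bool × Bool × Bool :=
  let st := if PySem.Str.startswith s "material:" then (true, st.2) else st
  let st := if PySem.Str.startswith s "keyword:" then (st.1, true, st.2.2) else st
  let st := if s = "sheet_reflection" then (st.1, st.2.1, true, st.2.2.2) else st
  let st := if PySem.Str.startswith s "pointer:" then (st.1, st.2.1, st.2.2.1, true, st.2.2.2.2) else st
  if s = "page_name" then (st.1, st.2.1, st.2.2.1, st.2.2.2.1, true) else st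

def page_evidence_flags_py_alt (reasons : List String) : List (String × Bool) :=
  let st := reasons.foldl pageFlagsStep (false, false, false, false, false)
  [("material", st.1), ("keyword", st.2.1), ("reflection", st.2.2.1),
   ("pointer", st.2.2.2.1), ("page_name", st.2.2.2.2)]

-- ===== PRECONDITION & SPEC =====
def Spec_page_evidence_flags_py (reasons : List String) (out : List (String × Bool)) : Prop := out = page_evidence_flags_py_alt reasons
instance (reasons : List String) (out : List (String × Bool)) : Decidable (Spec_page_evidence_flags_py reasons out) := by unfold Spec_page_evidence_flags_py; infer_instance

-- ===== CLAIM (what is proved, stated in full; the proofs are below) =====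
def Claim_equal_page_evidence_flags_py : Prop := ∀ (reasons : List String), Dom_page_evidence_flags_py reasons → Spec_page_evidence_flags_py reasons (page_evidence_flags_py reasons)

-- ===== LEMMAS AND PROOFS =====

-- B's fold computes or-accumulated any/contains for each flag
theorem beq_decide_comm (x y : String) : (x == y) = decide (y = x) := by
  rcases eq_or_ne x y with h | h
  · subst h; simp
  · simp [h, h.symm]

set_option maxRecDepth 8192 in
theorem pageFlagsStep_eq (m k r p pn : Bool) (x : String) :
    pageFlagsStep (m, k, r, p, pn) x =
      (m || PySem.Str.startswith x "material:",
       k || PySem.Str.startswith x "keyword:",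
       r || (x == "sheet_reflection"),
       p || PySem.Str.startswith x "pointer:",
       pn || (x == "page_name")) := by
  simp only [pageFlagsStep]
  split_ifs <;> simp_all

theorem pageFlags_foldl (xs : List String) (st : Bool × Bool × Bool × Bool × Bool) :
    xs.foldl pageFlagsStep st =
      (st.1 || xs.any (fun s => PySem.Str.startswith s "material:"),
       st.2.1 || xs.any (fun s => PySem.Str.startswith s "keyword:"),
       st.2.2.1 || xs.contains "sheet_reflection",
       st.2.2.2.1 || xs.any (fun s => PySem.Str.startswith s "pointer:"),
       st.2.2.2.2 || xs.contains "page_name") := by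
  induction xs generalizing st with
  | nil => simp
  | cons x xs ih =>
    obtain ⟨m, k, r, p, pn⟩ := st
    simp [List.foldl_cons, pageFlagsStep_eq, ih, Bool.or_assoc, beq_decide_comm]

theorem set_ofList_any {α : Type} [BEq α] [LawfulBEq α] (xs : List α) (p : α → Bool) :
    (PySem.Set.ofList xs).any p = xs.any p := by
  rw [Bool.eq_iff_iff]
  simp only [List.any_eq_true]
  constructor
  · rintro ⟨x, hx, hp⟩; exact ⟨x, (PySem.Set.mem_ofList _ _).1 hx, hp⟩
  · rintro ⟨x, hx, hp⟩; exact ⟨x, (PySem.Set.mem_ofList _ _).2 hx, hp⟩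

-- ===== VERDICT (by name: the statement is the Claim_ definition above) =====
theorem page_evidence_flags_py_spec : Claim_equal_page_evidence_flags_py := by
  intro reasons _
  unfold Spec_page_evidence_flags_py page_evidence_flags_py page_evidence_flags_py_alt
  simp [pageFlags_foldl, set_ofList_any, List.contains_eq_mem]
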